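-- pv_equiv track=rewrite | github.com/AnatolyaYtochka/Python_SkillBox_2023 | buns/mod3/task9.py | makeSteps
-- ===== SOURCE A (Python) =====
-- def makeSteps(n):
--     x, y = 0, 0
--     dx, dy = 1, 1
--     steps, stepForSide = 0, 1
--     for i in range(n):
--         dx = -dx
--         for j in range(stepForSide):
--             x += dx
--             steps += 1
--             if steps >= n:
--                 return str(x) + ' ' + str(y)
--
--         dy = -dy
--         for j in range(stepForSide):
--             y += dy
--             steps += 1
--             if steps >= n:
--                 return str(x) + ' ' + str(y)
--
--         stepForSide += 1
--     return str(x) + ' ' + str(y)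
-- ===== SOURCE B (Python) =====
-- def makeSteps(n):
--     # O(sqrt n): locate the completed pair count p with p(p+1) < n <= (p+1)(p+2),
--     # then compute the position arithmetically instead of walking step by step.
--     if n <= 0:
--         return "0 0"
--     p = 0
--     while (p + 1) * (p + 2) < n:
--         p += 1
--     # position after p complete pairs of sides: x = y = c
--     c = p // 2 if p % 2 == 0 else -(p + 1) // 2
--     x = y = c
--     r = n - p * (p + 1)          # remaining steps inside pair p+1, 1 <= r <= 2*(p+1)
--     s = p + 1                    # side length of pair p+1
--     sign = 1 if p % 2 == 1 else -1
--     if r <= s: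
--         x += sign * r
--     else:
--         x += sign * s
--         y += sign * (r - s)
--     return str(x) + ' ' + str(y)
-- ===== Notes on version B (the rewrite author's own statement) =====
-- stated objective: faster
-- what changed: Replaces the step-by-step O(n) spiral walk with an O(sqrt n) search for the last completed pair of sides followed by direct arithmetic for the final position.
import Mathlib
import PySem

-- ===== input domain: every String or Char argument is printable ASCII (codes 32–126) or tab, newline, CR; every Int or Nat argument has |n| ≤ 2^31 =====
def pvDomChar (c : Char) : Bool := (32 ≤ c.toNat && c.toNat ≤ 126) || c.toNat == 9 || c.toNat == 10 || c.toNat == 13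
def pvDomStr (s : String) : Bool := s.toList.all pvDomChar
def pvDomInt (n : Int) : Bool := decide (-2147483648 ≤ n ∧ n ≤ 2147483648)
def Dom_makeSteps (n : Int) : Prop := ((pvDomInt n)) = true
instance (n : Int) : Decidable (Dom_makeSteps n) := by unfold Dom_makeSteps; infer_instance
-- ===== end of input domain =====

-- B replaces A's O(n) step-by-step spiral walk by an O(sqrt n) pair search plus direct arithmetic.

-- ===== PORT A =====
-- inner 'for j in range(k)' loop of A over one coordinate v: early return (.inr v) when steps >= n
def pvInnerA (n : Int) : Nat → Int → Int → Int → (Int × Int) ⊕ Int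
  | 0, v, steps, _ => Sum.inl (v, steps)
  | Nat.succ k, v, steps, d =>
      let v' := v + d
      let steps' := steps + 1
      if n ≤ steps' then Sum.inr v' else pvInnerA n k v' steps' d

-- outer 'for i in range(n)' loop of A; fuel = remaining iterations
def pvOuterA (n : Int) : Nat → Int → Int → Int → Int → Int → Int → String
  | 0, x, y, _, _, _, _ => PySem.Int.toStr x ++ " " ++ PySem.Int.toStr y
  | Nat.succ i, x, y, dx, dy, steps, sfs =>
      let dx' := -dx
      match pvInnerA n sfs.toNat x steps dx' with
      | Sum.inr xf => PySem.Int.toStr xf ++ " " ++ PySem.Int.toStr y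
      | Sum.inl (x', steps1) =>
        let dy' := -dy
        match pvInnerA n sfs.toNat y steps1 dy' with
        | Sum.inr yf => PySem.Int.toStr x' ++ " " ++ PySem.Int.toStr yf
        | Sum.inl (y', steps2) => pvOuterA n i x' y' dx' dy' steps2 (sfs + 1)

def makeSteps (n : Int) : String := pvOuterA n n.toNat 0 0 1 1 0 1

-- ===== PORT B =====
-- 'while (p+1)*(p+2) < n: p += 1' (fuel bounds the loop; n.toNat is always enough)
def pvFindP (n : Int) : Nat → Int → Int
  | 0, p => p
  | Nat.succ f, p => if (p + 1) * (p + 2) < n then pvFindP n f (p + 1) else p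

def makeSteps_alt (n : Int) : String :=
  if n ≤ 0 then "0 0" else
  let p := pvFindP n n.toNat 0
  let c := if PySem.Int.mod p 2 = 0 then PySem.Int.floordiv p 2
           else PySem.Int.floordiv (-(p + 1)) 2
  let r := n - p * (p + 1)
  let s := p + 1
  let sign : Int := if PySem.Int.mod p 2 = 1 then 1 else -1
  let xy := if r ≤ s then (c + sign * r, c) else (c + sign * s, c + sign * (r - s))
  PySem.Int.toStr xy.1 ++ " " ++ PySem.Int.toStr xy.2

-- ===== PRECONDITION & SPEC =====
def Spec_makeSteps (n : Int) (out : String) : Prop := out = makeSteps_alt n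
instance (n : Int) (out : String) : Decidable (Spec_makeSteps n out) := by unfold Spec_makeSteps; infer_instance

-- ===== CLAIM (what is proved, stated in full; the proofs are below) =====
def Claim_equal_makeSteps : Prop := ∀ (n : Int), Dom_makeSteps n → Spec_makeSteps n (makeSteps n)

-- ===== LEMMAS AND PROOFS =====

-- direction sign of pair p (dx = dy after p completed pairs)
def pvSgn (p : Int) : Int := if p % 2 = 0 then 1 else -1
-- common coordinate value after p completed pairs of sides
def pvS (p : Int) : Int := if p % 2 = 0 then p / 2 else -((p + 1) / 2)

lemma pvSgn_succ (p : Int) : pvSgn (p + 1) = -pvSgn p := by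
  unfold pvSgn
  rcases Int.emod_two_eq p with h | h <;> simp [h, show (p+1) % 2 = (p % 2 + 1) % 2 by omega]

lemma pvS_succ (p : Int) : pvS (p + 1) = pvS p + pvSgn (p + 1) * (p + 1) := by
  unfold pvS pvSgn
  rcases Int.emod_two_eq p with h | h <;>
    simp only [h, show (p+1) % 2 = 1 - p % 2 by omega] <;> simp <;> omega

lemma pvInnerA_inl (n : Int) (k : Nat) (v steps d : Int) (h : steps + k < n) :
    pvInnerA n k v steps d = Sum.inl (v + d * k, steps + k) := by
  induction k generalizing v steps with
  | zero => simp [pvInnerA]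
  | succ k ih =>
    have hlt : ¬ n ≤ steps + 1 := by push_cast at h; omega
    simp only [pvInnerA, if_neg hlt]
    rw [ih (v + d) (steps + 1) (by push_cast at h ⊢; omega)]
    push_cast; ring_nf

lemma pvInnerA_inr (n : Int) (k : Nat) (v steps d : Int) (h1 : steps < n) (h2 : n ≤ steps + k) :
    pvInnerA n k v steps d = Sum.inr (v + d * (n - steps)) := by
  induction k generalizing v steps with
  | zero => push_cast at h2; omega
  | succ k ih =>
    by_cases h : n ≤ steps + 1
    · have : n - steps = 1 := by omega
      simp [pvInnerA, h, this]
    · simp only [pvInnerA, if_neg h]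
      rw [ih (v + d) (steps + 1) (by omega) (by push_cast at h2 ⊢; omega)]
      congr 1; ring

lemma pvFindP_spec (n : Int) : ∀ (fuel : Nat) (p : Int), 0 ≤ p → p * (p + 1) < n →
    n ≤ (p + fuel + 1) * (p + fuel + 2) →
    0 ≤ pvFindP n fuel p ∧ (pvFindP n fuel p) * (pvFindP n fuel p + 1) < n ∧
      n ≤ (pvFindP n fuel p + 1) * (pvFindP n fuel p + 2) := by
  intro fuel
  induction fuel with
  | zero => intro p h0 h1 h2; simp only [pvFindP]; push_cast at h2; exact ⟨h0, h1, by linarith⟩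
  | succ f ih =>
    intro p h0 h1 h2
    by_cases h : (p + 1) * (p + 2) < n
    · simp only [pvFindP, if_pos h]
      refine ih (p + 1) (by omega) (by linarith) ?_
      push_cast at h2 ⊢; linarith
    · simp only [pvFindP, if_neg h]
      exact ⟨h0, h1, by linarith⟩

lemma pvSandwich_unique (n p q : Int) (hp0 : 0 ≤ p) (hq0 : 0 ≤ q)
    (h1 : p * (p + 1) < n) (h2 : n ≤ (p + 1) * (p + 2))
    (h3 : q * (q + 1) < n) (h4 : n ≤ (q + 1) * (q + 2)) : p = q := by
  rcases lt_trichotomy p q with h | h | h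
  · nlinarith
  · exact h
  · nlinarith

-- makeSteps_alt expressed through ANY p satisfying the sandwich
lemma pvAlt_eq (n p : Int) (hn : 1 ≤ n) (hp0 : 0 ≤ p)
    (h1 : p * (p + 1) < n) (h2 : n ≤ (p + 1) * (p + 2)) :
    makeSteps_alt n =
      if n - p * (p + 1) ≤ p + 1
      then PySem.Int.toStr (pvS p + pvSgn (p + 1) * (n - p * (p + 1))) ++ " " ++ PySem.Int.toStr (pvS p)
      else PySem.Int.toStr (pvS p + pvSgn (p + 1) * (p + 1)) ++ " " ++
           PySem.Int.toStr (pvS p + pvSgn (p + 1) * (n - p * (p + 1) - (p + 1))) := by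
  have hq := pvFindP_spec n n.toNat 0 le_rfl (by omega)
    (by rw [Int.toNat_of_nonneg (by omega)]; nlinarith)
  obtain ⟨hq0, hq1, hq2⟩ := hq
  have hpq : p = pvFindP n n.toNat 0 := pvSandwich_unique n p _ hp0 hq0 h1 h2 hq1 hq2
  unfold makeSteps_alt
  rw [if_neg (by omega)]
  simp only [← hpq]
  have hm : PySem.Int.mod p 2 = p % 2 := PySem.Int.mod_eq_emod_of_pos (by omega)
  have hd : PySem.Int.floordiv p 2 = p / 2 := PySem.Int.floordiv_eq_ediv_of_pos (by omega)
  have hd2 : PySem.Int.floordiv (-(p + 1)) 2 = (-(p + 1)) / 2 := PySem.Int.floordiv_eq_ediv_of_pos (by omega)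
  rcases Int.emod_two_eq p with h | h
  · have hc : (if PySem.Int.mod p 2 = 0 then PySem.Int.floordiv p 2
        else PySem.Int.floordiv (-(p + 1)) 2) = pvS p := by
      simp [h, pvS]
    have hs : (if PySem.Int.mod p 2 = 1 then (1:Int) else -1) = pvSgn (p + 1) := by
      simp [h, pvSgn, show (p + 1) % 2 = 1 by omega]
    simp only [hc, hs]
    split <;> rfl
  · have hc : (if PySem.Int.mod p 2 = 0 then PySem.Int.floordiv p 2
        else PySem.Int.floordiv (-(p + 1)) 2) = pvS p := by
      simp only [hm, hd2, h, pvS]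
      norm_num
      omega
    have hs : (if PySem.Int.mod p 2 = 1 then (1:Int) else -1) = pvSgn (p + 1) := by
      simp [h, pvSgn, show (p + 1) % 2 = 0 by omega]
    simp only [hc, hs]
    split <;> rfl

lemma pvOuterA_main (n : Int) (hn : 1 ≤ n) : ∀ (fuel : Nat) (p : Int), 0 ≤ p →
    p * (p + 1) < n → n ≤ p + fuel →
    pvOuterA n fuel (pvS p) (pvS p) (pvSgn p) (pvSgn p) (p * (p + 1)) (p + 1) = makeSteps_alt n := by
  intro fuel
  induction fuel with
  | zero =>
    intro p h0 h1 h2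
    exfalso; push_cast at h2; nlinarith
  | succ f ih =>
    intro p h0 h1 h2
    have hk : ((p + 1).toNat : Int) = p + 1 := Int.toNat_of_nonneg (by omega)
    have hsgn : -pvSgn p = pvSgn (p + 1) := by rw [pvSgn_succ]
    by_cases hx : n ≤ p * (p + 1) + (p + 1)
    · -- A returns inside the first inner loop; B takes the r ≤ s branch
      simp only [pvOuterA, hsgn]
      rw [pvInnerA_inr n _ _ _ _ h1 (by rw [hk]; omega)]
      rw [pvAlt_eq n p hn h0 h1 (by nlinarith)]
      rw [if_pos (by omega)]
    · -- first inner loop completes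
      simp only [pvOuterA, hsgn]
      rw [pvInnerA_inl n _ _ _ _ (by rw [hk]; omega), hk]
      dsimp only
      by_cases hy : n ≤ p * (p + 1) + (p + 1) + (p + 1)
      · -- A returns inside the second inner loop; B takes the r > s branch
        rw [pvInnerA_inr n _ _ _ _ (by omega) (by rw [hk]; omega)]
        rw [pvAlt_eq n p hn h0 h1 (by nlinarith)]
        rw [if_neg (by omega)]
        have : n - (p * (p + 1) + (p + 1)) = n - p * (p + 1) - (p + 1) := by ring
        rw [this]
      · -- both inner loops complete: recurse to pair p+1
        rw [pvInnerA_inl n _ _ _ _ (by rw [hk]; omega), hk]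
        dsimp only
        have e1 : pvS p + pvSgn (p + 1) * (p + 1) = pvS (p + 1) := (pvS_succ p).symm
        have e2 : p * (p + 1) + (p + 1) + (p + 1) = (p + 1) * ((p + 1) + 1) := by ring
        rw [e1, e2]
        exact ih (p + 1) (by omega) (by nlinarith) (by push_cast at h2 ⊢; omega)

-- ===== VERDICT (by name: the statement is the Claim_ definition above) =====
theorem makeSteps_spec : Claim_equal_makeSteps := by
  intro n _
  unfold Spec_makeSteps
  by_cases hn : n ≤ 0
  · have h0 : n.toNat = 0 := by omega
    unfold makeSteps makeSteps_alt
    rw [h0, if_pos hn]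
    rfl
  · have h1 : 1 ≤ n := by omega
    have := pvOuterA_main n h1 n.toNat 0 le_rfl (by omega)
      (by rw [Int.toNat_of_nonneg (by omega)]; omega)
    simpa [pvS, pvSgn, makeSteps] using this
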